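-- pv_equiv track=rewrite | github.com/knappkeith/bus_lightrail | My_Bus_HTMLParser.py | remove_first_blanks
-- ===== SOURCE A (Python) =====
-- def remove_first_blanks(string):
--     ret_str = ""
--     remove_letter = True
--     for letter in string:
--         if remove_letter:
--             if not letter == " ":
--                 remove_letter = False
--                 ret_str += letter
--         else:
--             ret_str += letter
--     return ret_str
-- ===== SOURCE B (Python) =====
-- def remove_first_blanks(string):
--     for i, ch in enumerate(string):
--         if ch != " ":
--             return string[i:]
--     return ""
-- ===== Notes on version B (the rewrite author's own statement) =====
-- stated objective: simpler
-- what changed: B scans for the index of the first non-space and returns one slice string[i:] instead of accumulating characters one by one through a boolean flag.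
import Mathlib
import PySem

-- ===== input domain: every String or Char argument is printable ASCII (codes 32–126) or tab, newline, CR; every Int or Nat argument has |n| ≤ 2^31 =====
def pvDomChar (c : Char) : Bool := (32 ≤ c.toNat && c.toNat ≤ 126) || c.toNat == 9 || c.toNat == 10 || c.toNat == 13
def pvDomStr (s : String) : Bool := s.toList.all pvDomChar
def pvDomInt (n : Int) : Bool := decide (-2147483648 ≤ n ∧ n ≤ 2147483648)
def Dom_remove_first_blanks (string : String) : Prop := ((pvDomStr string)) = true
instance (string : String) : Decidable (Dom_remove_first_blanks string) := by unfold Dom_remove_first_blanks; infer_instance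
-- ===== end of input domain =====

-- B removes the leading spaces by finding the first non-space index and slicing once,
-- instead of A's flag-guarded character-by-character accumulation; objective: simpler.

-- ===== PORT A =====
-- state = (ret_str, remove_letter), exactly A's loop
def remove_first_blanks_step (st : List Char × Bool) (letter : Char) : List Char × Bool :=
  if st.2 then
    (if letter = ' ' then st else (st.1 ++ [letter], false))
  else
    (st.1 ++ [letter], st.2)

def remove_first_blanks (string : String) : String :=
  String.mk (string.toList.foldl remove_first_blanks_step ([], true)).1

-- ===== PORT B =====
-- B's index loop: advance past spaces; at the first non-space return the rest (string[i:]);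
-- if the scan runs out, return "".
def remove_first_blanks_scan : List Char → List Char
  | [] => []
  | c :: cs => if c ≠ ' ' then c :: cs else remove_first_blanks_scan cs

def remove_first_blanks_alt (string : String) : String :=
  String.mk (remove_first_blanks_scan string.toList)

-- ===== PRECONDITION & SPEC =====
def Spec_remove_first_blanks (string : String) (out : String) : Prop := out = remove_first_blanks_alt string
instance (string : String) (out : String) : Decidable (Spec_remove_first_blanks string out) := by unfold Spec_remove_first_blanks; infer_instance

-- ===== CLAIM (what is proved, stated in full; the proofs are below) =====
def Claim_equal_remove_first_blanks : Prop := ∀ (string : String), Dom_remove_first_blanks string → Spec_remove_first_blanks string (remove_first_blanks string)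

-- ===== LEMMAS AND PROOFS =====
theorem foldl_step_false (cs : List Char) (acc : List Char) :
    cs.foldl remove_first_blanks_step (acc, false) = (acc ++ cs, false) := by
  induction cs generalizing acc with
  | nil => simp
  | cons c cs ih =>
      simp [remove_first_blanks_step, ih]

theorem foldl_step_true (cs : List Char) (acc : List Char) :
    (cs.foldl remove_first_blanks_step (acc, true)).1 = acc ++ remove_first_blanks_scan cs := by
  induction cs generalizing acc with
  | nil => simp [remove_first_blanks_scan]
  | cons c cs ih =>
      by_cases h : c = ' '
      · simp [remove_first_blanks_step, remove_first_blanks_scan, h, ih]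
      · simp [remove_first_blanks_step, remove_first_blanks_scan, h, foldl_step_false]

-- ===== VERDICT (by name: the statement is the Claim_ definition above) =====
theorem remove_first_blanks_spec : Claim_equal_remove_first_blanks := by
  intro s _
  unfold Spec_remove_first_blanks remove_first_blanks remove_first_blanks_alt
  rw [foldl_step_true]
  simp
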